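-- pv_equiv track=rewrite | github.com/JKDMarks/adventofcode | 2020/day12/solution.py | rotate_wapyt
-- ===== SOURCE A (Python) =====
-- def rotate_wapyt(waypt_pos, direction, degree):
--     turn_ct = degree // 90
--     if direction == "L":
--         direction = "R"
--         turn_ct = 4 - turn_ct
--
--     for i in range(turn_ct):
--         waypt_pos = [waypt_pos[1], -1 * waypt_pos[0]]
--
--     return waypt_pos
-- ===== SOURCE B (Python) =====
-- def rotate_wapyt(waypt_pos, direction, degree):
--     turn_ct = degree // 90
--     if direction == "L":
--         turn_ct = 4 - turn_ct
--     if turn_ct <= 0: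
--         return waypt_pos
--     x, y = waypt_pos[0], waypt_pos[1]
--     return [[x, y], [y, -x], [-x, -y], [-y, x]][turn_ct % 4]
-- ===== Notes on version B (the rewrite author's own statement) =====
-- stated objective: simpler
-- what changed: Replaces the rotation loop (one quarter-turn per range() iteration) with a closed-form 4-way table indexed by turn_ct % 4, executed with no loop.
import Mathlib
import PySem

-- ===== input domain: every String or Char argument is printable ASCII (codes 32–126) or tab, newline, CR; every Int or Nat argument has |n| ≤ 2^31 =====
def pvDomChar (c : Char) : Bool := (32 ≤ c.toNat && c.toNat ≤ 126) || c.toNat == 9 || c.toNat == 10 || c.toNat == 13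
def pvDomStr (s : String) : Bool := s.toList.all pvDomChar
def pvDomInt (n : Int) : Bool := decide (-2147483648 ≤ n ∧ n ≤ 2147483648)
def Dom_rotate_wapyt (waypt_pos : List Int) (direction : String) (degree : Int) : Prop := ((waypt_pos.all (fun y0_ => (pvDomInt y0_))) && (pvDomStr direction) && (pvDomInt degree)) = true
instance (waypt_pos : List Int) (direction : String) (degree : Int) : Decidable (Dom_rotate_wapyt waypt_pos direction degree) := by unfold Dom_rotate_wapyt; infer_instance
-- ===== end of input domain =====

-- B replaces A's per-quarter-turn loop with a closed-form table on turn_ct % 4 (objective: simpler).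

-- ===== PORT A =====
def rotate_wapyt (waypt_pos : List Int) (direction : String) (degree : Int) : List Int :=
  let turn_ct0 := PySem.Int.floordiv degree 90
  let turn_ct := if direction == "L" then 4 - turn_ct0 else turn_ct0
  (PySem.List.pyRange 0 turn_ct 1).foldl
    (fun w _ => [PySem.List.pyGetD w 1 0, -1 * PySem.List.pyGetD w 0 0]) waypt_pos

-- ===== PORT B =====
def rotate_wapyt_alt (waypt_pos : List Int) (direction : String) (degree : Int) : List Int :=
  let turn_ct0 := PySem.Int.floordiv degree 90
  let turn_ct := if direction == "L" then 4 - turn_ct0 else turn_ct0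
  if turn_ct ≤ 0 then waypt_pos
  else
    let x := PySem.List.pyGetD waypt_pos 0 0
    let y := PySem.List.pyGetD waypt_pos 1 0
    let r := PySem.Int.mod turn_ct 4
    if r = 0 then [x, y]
    else if r = 1 then [y, -x]
    else if r = 2 then [-x, -y]
    else [-y, x]

-- ===== PRECONDITION & SPEC =====
-- Pre_ excludes exactly the inputs where Python A raises IndexError: a positive
-- turn count with fewer than 2 waypoint coordinates (B raises there too).
def Pre_rotate_wapyt (waypt_pos : List Int) (direction : String) (degree : Int) : Prop :=
  (if direction == "L" then 4 - PySem.Int.floordiv degree 90 else PySem.Int.floordiv degree 90) ≤ 0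
  ∨ 2 ≤ waypt_pos.length
instance (waypt_pos : List Int) (direction : String) (degree : Int) : Decidable (Pre_rotate_wapyt waypt_pos direction degree) := by unfold Pre_rotate_wapyt; infer_instance
def pvWitness_rotate_wapyt : List Int × String × Int := ([3, 4], "L", 90)

def Spec_rotate_wapyt (waypt_pos : List Int) (direction : String) (degree : Int) (out : List Int) : Prop := out = rotate_wapyt_alt waypt_pos direction degree
instance (waypt_pos : List Int) (direction : String) (degree : Int) (out : List Int) : Decidable (Spec_rotate_wapyt waypt_pos direction degree out) := by unfold Spec_rotate_wapyt; infer_instance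

-- ===== CLAIM (what is proved, stated in full; the proofs are below) =====
def Claim_equal_rotate_wapyt : Prop := ∀ (waypt_pos : List Int) (direction : String) (degree : Int), Dom_rotate_wapyt waypt_pos direction degree → Pre_rotate_wapyt waypt_pos direction degree → Spec_rotate_wapyt waypt_pos direction degree (rotate_wapyt waypt_pos direction degree)

-- ===== LEMMAS AND PROOFS =====

-- A's loop body, as a function of the state alone (the range element is ignored).
def pvRot (w : List Int) : List Int := [PySem.List.pyGetD w 1 0, -1 * PySem.List.pyGetD w 0 0]

theorem foldl_const_eq_iterate {α β : Type} (g : α → α) (l : List β) (init : α) :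
    l.foldl (fun w _ => g w) init = g^[l.length] init := by
  induction l generalizing init with
  | nil => rfl
  | cons a t ih => simp [List.foldl, ih, Function.iterate_succ_apply]

-- Value of n quarter-turns on a two-element vector, by the residue of n mod 4.
theorem iterate_pvRot (n : Nat) (x y : Int) :
    pvRot^[n] [x, y] =
      if n % 4 = 0 then [x, y]
      else if n % 4 = 1 then [y, -x]
      else if n % 4 = 2 then [-x, -y]
      else [-y, x] := by
  induction n generalizing x y with
  | zero => simp
  | succ n ih =>
    rw [Function.iterate_succ_apply]
    have hb : pvRot [x, y] = [y, -x] := by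
      simp [pvRot, PySem.List.pyGetD]
    rw [hb, ih y (-x)]
    have h4 : n % 4 = 0 ∨ n % 4 = 1 ∨ n % 4 = 2 ∨ n % 4 = 3 := by omega
    rcases h4 with h | h | h | h <;>
      · have : (n + 1) % 4 = (n % 4 + 1) % 4 := by omega
        simp [this, h]

theorem pvCore (w : List Int) (t : Int) (hpre : t ≤ 0 ∨ 2 ≤ w.length) :
    (PySem.List.pyRange 0 t 1).foldl
        (fun w _ => [PySem.List.pyGetD w 1 0, -1 * PySem.List.pyGetD w 0 0]) w
      = (if t ≤ 0 then w
         else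
           let x := PySem.List.pyGetD w 0 0
           let y := PySem.List.pyGetD w 1 0
           let r := PySem.Int.mod t 4
           if r = 0 then [x, y]
           else if r = 1 then [y, -x]
           else if r = 2 then [-x, -y]
           else [-y, x]) := by
  by_cases hle : t ≤ 0
  · rw [if_pos hle, PySem.List.pyRange_one_eq_nil (by omega : t ≤ 0)]
    rfl
  · have hlen : 2 ≤ w.length := by
      rcases hpre with h | h
      · exact absurd h hle
      · exact h
    obtain ⟨a, w1, hw⟩ : ∃ a w1, w = a :: w1 := by
      cases w with
      | nil => simp at hlen
      | cons a w1 => exact ⟨a, w1, rfl⟩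
    obtain ⟨b, w2, hw1⟩ : ∃ b w2, w1 = b :: w2 := by
      cases w1 with
      | nil => subst hw; simp at hlen
      | cons b w2 => exact ⟨b, w2, rfl⟩
    subst hw hw1
    have hfold :
        (PySem.List.pyRange 0 t 1).foldl
          (fun w _ => [PySem.List.pyGetD w 1 0, -1 * PySem.List.pyGetD w 0 0]) (a :: b :: w2)
        = pvRot^[t.toNat] (a :: b :: w2) := by
      rw [show (fun (w : List Int) (_ : Int) => [PySem.List.pyGetD w 1 0, -1 * PySem.List.pyGetD w 0 0])
            = (fun w _ => pvRot w) from by funext w i; simp [pvRot],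
          foldl_const_eq_iterate, PySem.List.length_pyRange_one]
      norm_num
    obtain ⟨n, hn⟩ : ∃ n : Nat, t.toNat = n + 1 := ⟨t.toNat - 1, by omega⟩
    have hfirst : pvRot (a :: b :: w2) = [b, -a] := by
      simp [pvRot, PySem.List.pyGetD]
    have hmod : PySem.Int.mod t 4 = ((t.toNat % 4 : Nat) : Int) := by
      rw [PySem.Int.mod_eq_emod_of_pos (by norm_num : (0:Int) < 4)]
      omega
    rw [hfold, hn, Function.iterate_succ_apply, hfirst, iterate_pvRot, if_neg hle]
    show _ = (if PySem.Int.mod t 4 = 0 then _ else _)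
    rw [hmod]
    have hx : PySem.List.pyGetD (a :: b :: w2) 0 0 = a := by simp [PySem.List.pyGetD]
    have hy : PySem.List.pyGetD (a :: b :: w2) 1 0 = b := by simp [PySem.List.pyGetD]
    rw [hx, hy]
    have h4 : n % 4 = 0 ∨ n % 4 = 1 ∨ n % 4 = 2 ∨ n % 4 = 3 := by omega
    rcases h4 with h | h | h | h <;>
      · have h' : t.toNat % 4 = (n % 4 + 1) % 4 := by omega
        norm_num [h, h']

theorem rotate_wapyt_eq_alt (waypt_pos : List Int) (direction : String) (degree : Int)
    (hpre : Pre_rotate_wapyt waypt_pos direction degree) :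
    rotate_wapyt waypt_pos direction degree = rotate_wapyt_alt waypt_pos direction degree := by
  unfold Pre_rotate_wapyt at hpre
  show (PySem.List.pyRange 0 _ 1).foldl _ _ = _
  exact pvCore waypt_pos
    (if direction == "L" then 4 - PySem.Int.floordiv degree 90 else PySem.Int.floordiv degree 90)
    hpre

-- ===== VERDICT (by name: the statement is the Claim_ definition above) =====
theorem rotate_wapyt_spec : Claim_equal_rotate_wapyt := by
  intro waypt_pos direction degree _ hpre
  unfold Spec_rotate_wapyt
  exact rotate_wapyt_eq_alt waypt_pos direction degree hpre
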